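-- pv_equiv track=rewrite | github.com/assignments-for-discussion/battery-inventory-in-py-VighneshaDevadigaUVCE | main.py | count_batteries_by_usage
-- ===== SOURCE A (Python) =====
-- def count_batteries_by_usage(cycles):
--   low_batteries_count=0
--   medium_batteries_count=0
--   high_batteries_count=0
--
--   for i in cycles:
--     if i<=0: #Base case
--       continue
--     elif i<410:
--       low_batteries_count+=1
--     elif i>=410 and i<950:
--       medium_batteries_count+=1
--     else:
--       high_batteries_count+=1
--   return {
--     "lowCount": low_batteries_count,
--     "mediumCount": medium_batteries_count,
--     "highCount": high_batteries_count
--   }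
-- ===== SOURCE B (Python) =====
-- def count_batteries_by_usage(cycles):
--   return {
--     "lowCount": sum(1 for i in cycles if 0 < i < 410),
--     "mediumCount": sum(1 for i in cycles if 410 <= i < 950),
--     "highCount": sum(1 for i in cycles if i >= 950),
--   }
-- ===== Notes on version B (the rewrite author's own statement) =====
-- stated objective: simpler
-- what changed: Replaces the single accumulator loop with a branch chain by three independent counting passes (one closed predicate per category), returning the dict directly.
import Mathlib
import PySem

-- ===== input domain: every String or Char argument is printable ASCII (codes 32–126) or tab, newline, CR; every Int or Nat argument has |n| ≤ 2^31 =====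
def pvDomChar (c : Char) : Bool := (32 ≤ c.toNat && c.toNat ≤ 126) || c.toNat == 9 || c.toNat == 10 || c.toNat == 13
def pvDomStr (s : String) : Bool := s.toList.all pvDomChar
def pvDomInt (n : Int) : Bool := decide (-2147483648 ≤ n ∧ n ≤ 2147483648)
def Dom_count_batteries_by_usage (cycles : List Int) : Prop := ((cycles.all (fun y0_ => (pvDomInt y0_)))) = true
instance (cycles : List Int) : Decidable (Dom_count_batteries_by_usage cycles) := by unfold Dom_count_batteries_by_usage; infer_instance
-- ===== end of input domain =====

-- B replaces A's single accumulator loop over a branch chain by three independent counting passes, one per category (simpler decomposition, same O(n) cost).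


-- ===== PORT A =====
-- loop state: (low, medium, high) counters, updated exactly as A's branch chain does
def count_batteries_by_usage (cycles : List Int) : List (String × Int) :=
  let s := cycles.foldl (fun (st : Int × Int × Int) i =>
    if i ≤ 0 then st
    else if i < 410 then (st.1 + 1, st.2.1, st.2.2)
    else if 410 ≤ i ∧ i < 950 then (st.1, st.2.1 + 1, st.2.2)
    else (st.1, st.2.1, st.2.2 + 1)) (0, 0, 0)
  [("lowCount", s.1), ("mediumCount", s.2.1), ("highCount", s.2.2)]

-- ===== PORT B =====
-- three independent counting passes, one per category (Source B's sum-of-generator calls)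
def count_batteries_by_usage_alt (cycles : List Int) : List (String × Int) :=
  [("lowCount", (cycles.countP (fun i => 0 < i ∧ i < 410) : Nat)),
   ("mediumCount", (cycles.countP (fun i => 410 ≤ i ∧ i < 950) : Nat)),
   ("highCount", (cycles.countP (fun i => 950 ≤ i) : Nat))]

-- ===== PRECONDITION & SPEC =====
def Spec_count_batteries_by_usage (cycles : List Int) (out : List (String × Int)) : Prop := out = count_batteries_by_usage_alt cycles
instance (cycles : List Int) (out : List (String × Int)) : Decidable (Spec_count_batteries_by_usage cycles out) := by unfold Spec_count_batteries_by_usage; infer_instance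

-- ===== CLAIM (what is proved, stated in full; the proofs are below) =====
def Claim_equal_count_batteries_by_usage : Prop := ∀ (cycles : List Int), Dom_count_batteries_by_usage cycles → Spec_count_batteries_by_usage cycles (count_batteries_by_usage cycles)

-- ===== LEMMAS AND PROOFS =====

-- loop invariant: folding from state (a,b,c) adds the three category counts
lemma fold_counts (cycles : List Int) (a b c : Int) :
    cycles.foldl (fun (st : Int × Int × Int) i =>
      if i ≤ 0 then st
      else if i < 410 then (st.1 + 1, st.2.1, st.2.2)
      else if 410 ≤ i ∧ i < 950 then (st.1, st.2.1 + 1, st.2.2)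
      else (st.1, st.2.1, st.2.2 + 1)) (a, b, c)
    = (a + (cycles.countP (fun i => 0 < i ∧ i < 410) : Nat),
       b + (cycles.countP (fun i => 410 ≤ i ∧ i < 950) : Nat),
       c + (cycles.countP (fun i => 950 ≤ i) : Nat)) := by
  induction cycles generalizing a b c with
  | nil => simp
  | cons x xs ih =>
    simp only [List.foldl_cons, List.countP_cons]
    by_cases h1 : x ≤ 0
    · rw [if_pos h1, ih]
      refine Prod.ext ?_ (Prod.ext ?_ ?_) <;> simp <;> omega
    · rw [if_neg h1]
      by_cases h2 : x < 410
      · rw [if_pos h2, ih]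
        refine Prod.ext ?_ (Prod.ext ?_ ?_) <;> simp <;> omega
      · rw [if_neg h2]
        by_cases h3 : x < 950
        · rw [if_pos (show (410:Int) ≤ x ∧ x < 950 from ⟨by omega, h3⟩), ih]
          refine Prod.ext ?_ (Prod.ext ?_ ?_) <;> simp <;> omega
        · rw [if_neg (show ¬((410:Int) ≤ x ∧ x < 950) by omega), ih]
          refine Prod.ext ?_ (Prod.ext ?_ ?_) <;> simp <;> omega

-- ===== VERDICT (by name: the statement is the Claim_ definition above) =====
theorem count_batteries_by_usage_spec : Claim_equal_count_batteries_by_usage := by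
  intro cycles _
  show _ = _
  simp [count_batteries_by_usage, count_batteries_by_usage_alt, fold_counts]
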